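-- pv_equiv track=rewrite | github.com/nunenuh/layoutlm.pytorch | laylm/data/utils.py | bilou_prefixer
-- ===== SOURCE A (Python) =====
-- def bilou_prefixer(text_list, label=None):
--     out = []
--     text_len = len(text_list)
--     if text_len==1:
--         bl = "U"
--         if label!=None: bl =  bl + "-" + label
--         out.append(bl)
--     elif text_len>1:
--         for idx, text in enumerate(text_list):
--             if idx==0:
--                 bl = "B"
--                 if label!=None: bl = bl + "-" + label
--                 out.append(bl)
--             elif idx < text_len - 1:
--                 bl = "I"
--                 if label!=None: bl = bl + "-" + label
--                 out.append(bl)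
--             else:
--                 bl = "L"
--                 if label!=None: bl =  bl + "-" + label
--                 out.append(bl)
--     return out
-- ===== SOURCE B (Python) =====
-- def bilou_prefixer(text_list, label=None):
--     n = len(text_list)
--     if n == 0:
--         letters = []
--     elif n == 1:
--         letters = ["U"]
--     else:
--         letters = ["B"] + ["I"] * (n - 2) + ["L"]
--     if label is not None:
--         return [l + "-" + label for l in letters]
--     return letters
-- ===== Notes on version B (the rewrite author's own statement) =====
-- stated objective: simpler
-- what changed: Instead of A's per-index branching loop that repeats the label check in every branch, the new implementation builds the letter sequence by concatenating whole segments (the begin tag, n-2 inside tags, the last tag) and then appends the label suffix with a single comprehension.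
import Mathlib
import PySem

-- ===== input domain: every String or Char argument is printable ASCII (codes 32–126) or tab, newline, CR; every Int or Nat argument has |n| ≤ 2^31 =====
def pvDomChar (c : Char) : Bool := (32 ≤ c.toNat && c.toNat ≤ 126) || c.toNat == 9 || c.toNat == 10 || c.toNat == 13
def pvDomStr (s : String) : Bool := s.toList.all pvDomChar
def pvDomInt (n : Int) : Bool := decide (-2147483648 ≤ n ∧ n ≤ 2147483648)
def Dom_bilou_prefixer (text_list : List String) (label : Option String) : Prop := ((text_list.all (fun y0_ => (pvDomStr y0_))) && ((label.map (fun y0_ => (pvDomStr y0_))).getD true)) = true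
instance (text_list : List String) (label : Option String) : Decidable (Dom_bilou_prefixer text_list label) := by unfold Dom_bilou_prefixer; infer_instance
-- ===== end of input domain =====

-- B builds the letter list by segment concatenation ("B" :: "I"*(n-2) ++ ["L"]) then maps the
-- label suffix once, replacing A's per-index branching loop; objective: simpler.


-- ===== PORT A =====
-- helper for "if label!=None: bl = bl + '-' + label"
def pvTagA (bl : String) (label : Option String) : String :=
  match label with
  | some l => bl ++ "-" ++ l
  | none => bl

def bilou_prefixer (text_list : List String) (label : Option String) : List String :=
  let out : List String := []
  let text_len : Int := text_list.length
  if text_len == 1 then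
    out ++ [pvTagA "U" label]
  else if text_len > 1 then
    (PySem.List.enumerate text_list).foldl
      (fun out p =>
        if p.1 == 0 then out ++ [pvTagA "B" label]
        else if p.1 < text_len - 1 then out ++ [pvTagA "I" label]
        else out ++ [pvTagA "L" label])
      out
  else out

-- ===== PORT B =====
def bilou_prefixer_alt (text_list : List String) (label : Option String) : List String :=
  let n := text_list.length
  let letters : List String :=
    if n == 0 then []
    else if n == 1 then ["U"]
    else "B" :: (List.replicate (n - 2) "I" ++ ["L"])
  match label with
  | some l => letters.map (fun x => x ++ "-" ++ l)
  | none => letters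

-- ===== PRECONDITION & SPEC =====
def Spec_bilou_prefixer (text_list : List String) (label : Option String) (out : List String) : Prop := out = bilou_prefixer_alt text_list label
instance (text_list : List String) (label : Option String) (out : List String) : Decidable (Spec_bilou_prefixer text_list label out) := by unfold Spec_bilou_prefixer; infer_instance

-- ===== CLAIM (what is proved, stated in full; the proofs are below) =====
def Claim_equal_bilou_prefixer : Prop := ∀ (text_list : List String) (label : Option String), Dom_bilou_prefixer text_list label → Spec_bilou_prefixer text_list label (bilou_prefixer text_list label)

-- ===== LEMMAS AND PROOFS =====

-- A's loop body from index 1 on, over a tail of length ≥ 1: emits "I" for every element with a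
-- nonempty remainder and "L" for the last one.  s is the current index, n = text_len.
theorem pvLoopA (label : Option String) (n : Int) :
    ∀ (xs : List String) (s : Int) (acc : List String), xs ≠ [] → s + xs.length = n → 1 ≤ s →
    (PySem.List.enumerate xs s).foldl
      (fun out p =>
        if p.1 == 0 then out ++ [pvTagA "B" label]
        else if p.1 < n - 1 then out ++ [pvTagA "I" label]
        else out ++ [pvTagA "L" label])
      acc
    = acc ++ List.replicate (xs.length - 1) (pvTagA "I" label) ++ [pvTagA "L" label] := by
  intro xs
  induction xs with
  | nil => intro s acc h; exact absurd rfl h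
  | cons x t ih =>
    intro s acc _ hlen hs
    rw [PySem.List.enumerate_cons]
    simp only [List.foldl_cons]
    have hs0 : (s == 0) = false := by simp; omega
    by_cases ht : t = []
    · subst ht
      have : (s < n - 1) = False := by simp at hlen ⊢; omega
      simp [hs0, this]
    · have htl : 0 < t.length := List.length_pos_iff.mpr ht
      have hlt : s < n - 1 := by simp at hlen; omega
      rw [if_neg (by simp; omega), if_pos hlt]
      rw [ih (s + 1) (acc ++ [pvTagA "I" label]) ht (by simp at hlen ⊢; omega) (by omega)]
      have : (x :: t).length - 1 = t.length - 1 + 1 := by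
        have := List.length_pos_iff.mpr ht; simp; omega
      rw [this, List.replicate_succ, List.append_assoc, List.append_assoc]
      simp

theorem bilou_main (text_list : List String) (label : Option String) :
    bilou_prefixer text_list label = bilou_prefixer_alt text_list label := by
  match text_list, label with
  | [], label => cases label <;> rfl
  | [x], label => cases label <;> rfl
  | x :: y :: t, label =>
    unfold bilou_prefixer
    rw [if_neg (by simp; omega), if_pos (by simp)]
    rw [PySem.List.enumerate_cons, List.foldl_cons]
    rw [if_pos (by decide : ((0:Int) == 0) = true)]
    rw [List.nil_append, (by norm_num : (0:Int) + 1 = 1)]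
    rw [pvLoopA label ((x :: y :: t).length : Int) (y :: t) 1 [pvTagA "B" label] (by simp)
          (by simp; omega) (by omega)]
    have hb : bilou_prefixer_alt (x :: y :: t) label
        = (("B" :: (List.replicate ((x :: y :: t).length - 2) "I" ++ ["L"])).map
            (fun b => pvTagA b label)) := by
      unfold bilou_prefixer_alt
      cases label <;> simp [pvTagA]
    rw [hb]
    simp [List.map_replicate, pvTagA]

-- ===== VERDICT (by name: the statement is the Claim_ definition above) =====
theorem bilou_prefixer_spec : Claim_equal_bilou_prefixer := by
  intro tl lab _
  exact bilou_main tl lab
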